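-- pv_equiv track=rewrite | github.com/premaseem/pythonLab | practice/freq_finder_coding_question.py | freq_sort
-- ===== SOURCE A (Python) =====
-- def freq_sort(k,lst):
--     lst.sort()
--     freq_lst = []
--     for i,num in enumerate(lst):
--         freq = 0
--         for x in range(i,len(lst)):
--             if lst[x] <= (num + 300):
--                 freq += 1
--         freq_lst.append(freq)
--
--     hf = max(freq_lst)
--     si = freq_lst.index(hf)
--     ei = si+hf
--
--
--     return k,hf, freq_lst, lst[si:ei],
-- ===== SOURCE B (Python) =====
-- # Two-pointer over the sorted list: each window count is j - i for a monotone
-- # right pointer j, and the best (first-max) window is tracked in the same pass.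
-- # Like A, this sorts lst in place.
-- def freq_sort(k, lst):
--     lst.sort()
--     n = len(lst)
--     freq_lst = []
--     j = 0
--     hf = 0
--     si = 0
--     for i in range(n):
--         while j < n and lst[j] <= lst[i] + 300:
--             j += 1
--         f = j - i
--         freq_lst.append(f)
--         if f > hf:
--             hf = f
--             si = i
--     return k, hf, freq_lst, lst[si:si + hf]
-- ===== Notes on version B (the rewrite author's own statement) =====
-- stated objective: faster
-- what changed: Replaces A's quadratic per-index rescan of the sorted list (and the separate max()/.index() passes) by a single two-pointer sweep whose right pointer moves monotonically, tracking the first maximal window in the same pass.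
import Mathlib
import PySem

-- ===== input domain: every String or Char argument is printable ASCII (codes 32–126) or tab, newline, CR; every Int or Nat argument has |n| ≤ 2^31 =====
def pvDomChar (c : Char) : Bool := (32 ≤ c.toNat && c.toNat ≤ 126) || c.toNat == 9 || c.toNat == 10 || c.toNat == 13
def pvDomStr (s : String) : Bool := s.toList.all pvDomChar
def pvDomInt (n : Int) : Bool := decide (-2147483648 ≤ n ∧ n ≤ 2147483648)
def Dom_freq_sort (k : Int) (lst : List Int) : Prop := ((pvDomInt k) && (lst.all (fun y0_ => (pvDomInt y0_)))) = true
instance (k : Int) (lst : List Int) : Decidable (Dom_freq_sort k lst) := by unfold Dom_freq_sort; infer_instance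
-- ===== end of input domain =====

-- B replaces A's quadratic per-index rescans by one two-pointer sweep over the sorted
-- list that also tracks the first maximal window; equivalence is about the RETURN value
-- (both A and B sort lst in place in Python).

-- ===== PORT A =====
-- max()/.index() raise on an empty list; Pre_ excludes lst = [], so the .getD 0 defaults are never used there.
def freq_sort (k : Int) (lst : List Int) : Int × Int × List Int × List Int :=
  let s := PySem.List.sorted lst (fun x => x)
  let freq_lst := (PySem.List.enumerate s).foldl (fun acc p =>
    acc ++ [(PySem.List.pyRange p.1 (PySem.List.len s)).foldl
      (fun freq x => if PySem.List.pyGetD s x 0 ≤ p.2 + 300 then freq + 1 else freq) (0 : Int)]) []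
  let hf := (PySem.List.max? freq_lst (fun y => y)).getD 0
  let si : Nat := (PySem.List.index? freq_lst hf).getD 0
  let ei : Int := (si : Int) + hf
  (k, hf, freq_lst, PySem.List.slice s (some (si : Int)) (some ei))

-- ===== PORT B =====
-- the inner 'while j < n and lst[j] <= lst[i] + 300: j += 1' (indices always in range, so List.getD is exact)
def fsAdvance (s : List Int) (t : Int) (j : Nat) : Nat :=
  if _ : j < s.length then
    if s.getD j 0 ≤ t then fsAdvance s t (j + 1) else j
  else j
termination_by s.length - j

-- the 'for i in range(n)' loop with state (j, freq_lst, hf, si)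
def fsLoop (s : List Int) (i j : Nat) (freq : List Int) (hf si : Int) :
    List Int × Int × Int :=
  if _ : i < s.length then
    let j' := fsAdvance s (s.getD i 0 + 300) j
    let f : Int := (j' : Int) - (i : Int)
    if hf < f then fsLoop s (i + 1) j' (freq ++ [f]) f (i : Int)
    else fsLoop s (i + 1) j' (freq ++ [f]) hf si
  else (freq, hf, si)
termination_by s.length - i

def freq_sort_alt (k : Int) (lst : List Int) : Int × Int × List Int × List Int :=
  let s := PySem.List.sorted lst (fun x => x)
  let r := fsLoop s 0 0 [] 0 0
  (k, r.2.1, r.1, PySem.List.slice s (some r.2.2) (some (r.2.2 + r.2.1)))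

-- ===== PRECONDITION & SPEC =====
-- Pre_ excludes only the empty list, on which A's max(freq_lst) raises ValueError.
def Pre_freq_sort (k : Int) (lst : List Int) : Prop := lst ≠ []
instance (k : Int) (lst : List Int) : Decidable (Pre_freq_sort k lst) := by unfold Pre_freq_sort; infer_instance

def pvWitness_freq_sort : Int × List Int := (5, [1000, 1, 200])

def Spec_freq_sort (k : Int) (lst : List Int) (out : Int × Int × List Int × List Int) : Prop := out = freq_sort_alt k lst
instance (k : Int) (lst : List Int) (out : Int × Int × List Int × List Int) : Decidable (Spec_freq_sort k lst out) := by unfold Spec_freq_sort; infer_instance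

-- ===== CLAIM (what is proved, stated in full; the proofs are below) =====
def Claim_equal_freq_sort : Prop := ∀ (k : Int) (lst : List Int), Dom_freq_sort k lst → Pre_freq_sort k lst → Spec_freq_sort k lst (freq_sort k lst)

-- ===== LEMMAS AND PROOFS =====

-- the per-index window count both programs compute on the sorted list s
def fsF (s : List Int) (x : Nat) : Int :=
  (s.countP (fun v => decide (v ≤ s.getD x 0 + 300)) : Int) - x

-- the tail of the frequency list from index i on
def fsTf (s : List Int) (i : Nat) : List Int :=
  (List.range' i (s.length - i)).map (fsF s)

-- B's running (hf, si) update, abstracted from fsLoop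
def fsPfold : List Int → Nat → Int × Int → Int × Int
  | [], _, pr => pr
  | f :: tl, i0, pr => fsPfold tl (i0 + 1) (if pr.1 < f then (f, (i0 : Int)) else pr)

theorem fs_pw_mono (s : List Int) (hs : List.Pairwise (· ≤ ·) s) {p q : Nat}
    (hpq : p ≤ q) (hq : q < s.length) : s[p]'(by omega) ≤ s[q] := by
  rcases Nat.lt_or_ge p q with h | h
  · exact (List.pairwise_iff_getElem.mp hs) p q (by omega) hq h
  · have : p = q := by omega
    subst this; exact le_refl _

theorem fs_count_thresh (s : List Int) (hs : List.Pairwise (· ≤ ·) s) (t : Int) :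
    ∀ (x : Nat) (hx : x < s.length),
      (s[x] ≤ t ↔ x < s.countP (fun v => decide (v ≤ t))) := by
  induction s with
  | nil => intro x hx; simp at hx
  | cons a rest ih =>
    rw [List.pairwise_cons] at hs
    intro x hx
    rw [List.countP_cons]
    by_cases ha : a ≤ t
    · cases x with
      | zero => simp [ha]
      | succ m =>
        simp only [List.getElem_cons_succ, ha]
        rw [ih hs.2 m (by simpa using hx)]
        simp
    · have hrest : rest.countP (fun v => decide (v ≤ t)) = 0 := by
        rw [List.countP_eq_zero]
        intro v hv
        simp only [decide_eq_true_eq]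
        have := hs.1 v hv
        omega
      cases x with
      | zero => simp [ha, hrest]
      | succ m =>
        simp only [List.getElem_cons_succ, hrest, ha]
        have hm : rest[m]'(by simpa using hx) ∈ rest := List.getElem_mem _
        have := hs.1 _ hm
        constructor
        · intro h; omega
        · intro h; simp at h

theorem fs_advance_eq (s : List Int) (hs : List.Pairwise (· ≤ ·) s) (t : Int) :
    ∀ (j : Nat), j ≤ s.countP (fun v => decide (v ≤ t)) →
      fsAdvance s t j = s.countP (fun v => decide (v ≤ t)) := by
  have hc : s.countP (fun v => decide (v ≤ t)) ≤ s.length := List.countP_le_length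
  have main : ∀ (m j : Nat), s.length - j ≤ m → j ≤ s.countP (fun v => decide (v ≤ t)) →
      fsAdvance s t j = s.countP (fun v => decide (v ≤ t)) := by
    intro m
    induction m with
    | zero =>
      intro j h1 h2
      rw [fsAdvance, dif_neg (by omega)]
      omega
    | succ m ih =>
      intro j h1 h2
      rw [fsAdvance]
      by_cases hjn : j < s.length
      · rw [dif_pos hjn]
        have hget : s.getD j 0 = s[j] := List.getD_eq_getElem s 0 hjn
        by_cases hle : s.getD j 0 ≤ t
        · rw [if_pos hle]
          have : j < s.countP (fun v => decide (v ≤ t)) :=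
            (fs_count_thresh s hs t j hjn).mp (by rwa [hget] at hle)
          exact ih (j + 1) (by omega) (by omega)
        · rw [if_neg hle]
          have : ¬ j < s.countP (fun v => decide (v ≤ t)) :=
            fun hlt => hle (hget ▸ (fs_count_thresh s hs t j hjn).mpr hlt)
          omega
      · rw [dif_neg hjn]; omega
  exact fun j hj => main s.length j (by omega) hj

theorem fs_freq_split (s : List Int) (hs : List.Pairwise (· ≤ ·) s) (i : Nat) (hi : i < s.length) :
    ((s.drop i).countP (fun v => decide (v ≤ s.getD i 0 + 300)) : Int) = fsF s i := by
  have hget : s.getD i 0 = s[i] := List.getD_eq_getElem s 0 hi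
  have hsplit : s.countP (fun v => decide (v ≤ s.getD i 0 + 300))
      = (s.take i).countP (fun v => decide (v ≤ s.getD i 0 + 300))
      + (s.drop i).countP (fun v => decide (v ≤ s.getD i 0 + 300)) := by
    rw [← List.countP_append, List.take_append_drop]
  have htake : (s.take i).countP (fun v => decide (v ≤ s.getD i 0 + 300)) = i := by
    have hall : ∀ a ∈ s.take i, decide (a ≤ s.getD i 0 + 300) = true := by
      intro a ha
      obtain ⟨j, hj, hja⟩ := List.mem_take_iff_getElem.mp ha
      have hji : j ≤ i := by omega
      have := fs_pw_mono s hs hji hi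
      rw [hja] at this
      simp only [decide_eq_true_eq, hget]
      omega
    rw [List.countP_eq_length.mpr hall, List.length_take]
    omega
  unfold fsF
  omega

theorem fs_enum_map (xs : List Int) (F : Int × Int → Int) :
    ∀ (st : Nat), (PySem.List.enumerate xs (st : Int)).map F
      = (List.range' st xs.length).map (fun (i : Nat) => F ((i : Int), xs.getD (i - st) 0)) := by
  induction xs with
  | nil => intro st; simp [PySem.List.enumerate_nil]
  | cons x xs ih =>
    intro st
    rw [PySem.List.enumerate_cons]
    simp only [List.map_cons, List.length_cons, List.range'_succ, Nat.sub_self, List.getD_cons_zero]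
    congr 1
    · have : ((st : Int) + 1) = ((st + 1 : Nat) : Int) := by push_cast; ring
      rw [this, ih (st + 1)]
      apply List.map_congr_left
      intro i hi
      have hst : st + 1 ≤ i := (List.mem_range'_1.mp hi).1
      have : i - st = (i - (st + 1)) + 1 := by omega
      rw [this, List.getD_cons_succ]

theorem fs_A_freq (s : List Int) (hs : List.Pairwise (· ≤ ·) s) :
    (PySem.List.enumerate s).foldl (fun acc p =>
      acc ++ [(PySem.List.pyRange p.1 (PySem.List.len s)).foldl
        (fun freq x => if PySem.List.pyGetD s x 0 ≤ p.2 + 300 then freq + 1 else freq) (0 : Int)]) []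
    = fsTf s 0 := by
  rw [PySem.List.foldl_append_singleton_eq_map
    (f := fun p : Int × Int => (PySem.List.pyRange p.1 (PySem.List.len s)).foldl
      (fun freq x => if PySem.List.pyGetD s x 0 ≤ p.2 + 300 then freq + 1 else freq) (0 : Int))]
  have h0 : (0 : Int) = ((0 : Nat) : Int) := rfl
  rw [List.nil_append, show PySem.List.enumerate s = PySem.List.enumerate s ((0 : Nat) : Int) from rfl,
    fs_enum_map]
  unfold fsTf
  rw [Nat.sub_zero]
  apply List.map_congr_left
  intro i hi
  have hi' : i < s.length := by
    have := List.mem_range'_1.mp hi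
    omega
  simp only [Nat.sub_zero]
  rw [show PySem.List.len s = ((s.length : Int)) from by simp [PySem.List.len]]
  rw [PySem.List.foldl_pyRange_pyGetD' s 0
    (fun freq v => if v ≤ s.getD i 0 + 300 then freq + 1 else freq) 0 (by positivity)]
  rw [Int.toNat_natCast]
  rw [PySem.List.foldl_ite_add_one (fun v => v ≤ s.getD i 0 + 300)]
  rw [zero_add]
  exact fs_freq_split s hs i hi'

theorem fs_loop_eq (s : List Int) (hs : List.Pairwise (· ≤ ·) s) :
    ∀ (i j : Nat) (freq : List Int) (hf si : Int),
      (i < s.length → j ≤ s.countP (fun v => decide (v ≤ s.getD i 0 + 300))) →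
      fsLoop s i j freq hf si = (freq ++ fsTf s i, fsPfold (fsTf s i) i (hf, si)) := by
  have main : ∀ (m i j : Nat) (freq : List Int) (hf si : Int), s.length - i ≤ m →
      (i < s.length → j ≤ s.countP (fun v => decide (v ≤ s.getD i 0 + 300))) →
      fsLoop s i j freq hf si = (freq ++ fsTf s i, fsPfold (fsTf s i) i (hf, si)) := by
    intro m
    induction m with
    | zero =>
      intro i j freq hf si h1 _
      have hni : ¬ i < s.length := by omega
      rw [fsLoop, dif_neg hni]
      have : fsTf s i = [] := by
        unfold fsTf
        rw [show s.length - i = 0 from by omega]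
        rfl
      rw [this]
      simp [fsPfold]
    | succ m ih =>
      intro i j freq hf si h1 hinv
      by_cases hin : i < s.length
      · rw [fsLoop, dif_pos hin]
        have hadv : fsAdvance s (s.getD i 0 + 300) j
            = s.countP (fun v => decide (v ≤ s.getD i 0 + 300)) :=
          fs_advance_eq s hs _ j (hinv hin)
        have hf_eq : ((s.countP (fun v => decide (v ≤ s.getD i 0 + 300)) : Nat) : Int) - (i : Int)
            = fsF s i := by unfold fsF; ring
        have htf : fsTf s i = fsF s i :: fsTf s (i + 1) := by
          unfold fsTf
          rw [show s.length - i = (s.length - (i + 1)) + 1 from by omega, List.range'_succ]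
          rfl
        have hinv' : i + 1 < s.length →
            s.countP (fun v => decide (v ≤ s.getD i 0 + 300))
              ≤ s.countP (fun v => decide (v ≤ s.getD (i + 1) 0 + 300)) := by
          intro hin'
          apply List.countP_mono_left
          intro x _ hx
          simp only [decide_eq_true_eq] at *
          have hmono : s.getD i 0 ≤ s.getD (i + 1) 0 := by
            rw [List.getD_eq_getElem s 0 hin, List.getD_eq_getElem s 0 hin']
            exact fs_pw_mono s hs (by omega) hin'
          omega
        rw [hadv]
        simp only [hf_eq, htf, fsPfold]
        by_cases hlt : hf < fsF s i
        · rw [if_pos hlt, if_pos hlt]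
          rw [ih (i + 1) _ (freq ++ [fsF s i]) (fsF s i) (i : Int) (by omega) hinv']
          simp
        · rw [if_neg hlt, if_neg hlt]
          rw [ih (i + 1) _ (freq ++ [fsF s i]) hf si (by omega) hinv']
          simp
      · rw [fsLoop, dif_neg hin]
        have : fsTf s i = [] := by
          unfold fsTf
          rw [show s.length - i = 0 from by omega]
          rfl
        rw [this]
        simp [fsPfold]
  exact fun i j freq hf si hinv => main s.length i j freq hf si (by omega) hinv

theorem fs_pfold_no_update : ∀ (l : List Int) (i0 : Nat) (pr : Int × Int),
    (∀ x ∈ l, x ≤ pr.1) → fsPfold l i0 pr = pr := by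
  intro l
  induction l with
  | nil => intro _ _ _; rfl
  | cons f tl ih =>
    intro i0 pr h
    have hf : f ≤ pr.1 := h f (by simp)
    rw [fsPfold, if_neg (by omega)]
    exact ih _ _ (fun x hx => h x (by simp [hx]))

theorem fs_foldl_max_all_le : ∀ (l : List Int) (a : Int), (∀ x ∈ l, x ≤ a) → l.foldl max a = a := by
  intro l
  induction l with
  | nil => intro _ _; rfl
  | cons f tl ih =>
    intro a h
    have hf : f ≤ a := h f (by simp)
    simp only [List.foldl_cons, max_eq_left hf]
    exact ih a (fun x hx => h x (by simp [hx]))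

theorem fs_pfold_max : ∀ (l : List Int) (i0 : Nat) (hf si : Int), (∃ x ∈ l, hf < x) →
    fsPfold l i0 (hf, si)
      = (l.foldl max hf, (i0 : Int) + (List.idxOf (l.foldl max hf) l : Int)) := by
  intro l
  induction l with
  | nil => intro i0 hf si h; simp at h
  | cons f t ih =>
    intro i0 hf si hex
    rw [fsPfold]
    by_cases hlt : hf < f
    · rw [if_pos (by simpa using hlt)]
      by_cases hex2 : ∃ x ∈ t, f < x
      · rw [ih (i0 + 1) f (i0 : Int) hex2]
        have hmax : (f :: t).foldl max hf = t.foldl max f := by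
          simp [max_eq_right (le_of_lt hlt)]
        rw [hmax]
        obtain ⟨x, hx, hfx⟩ := hex2
        have hxM : x ≤ t.foldl max f := (PySem.List.le_foldl_max t f).2 x hx
        have hne : f ≠ t.foldl max f := by omega
        rw [List.idxOf_cons_ne t hne]
        simp only [Prod.mk.injEq]
        exact ⟨trivial, by push_cast; ring⟩
      · push_neg at hex2
        rw [fs_pfold_no_update t (i0 + 1) (f, (i0 : Int)) (fun x hx => hex2 x hx)]
        have hmax : (f :: t).foldl max hf = f := by
          simp only [List.foldl_cons, max_eq_right (le_of_lt hlt)]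
          exact fs_foldl_max_all_le t f (fun x hx => hex2 x hx)
        rw [hmax, List.idxOf_cons_self]
        simp
    · rw [if_neg (by simpa using hlt)]
      push_neg at hlt
      have hex2 : ∃ x ∈ t, hf < x := by
        obtain ⟨x, hx, hfx⟩ := hex
        rcases List.mem_cons.mp hx with h | h
        · subst h; omega
        · exact ⟨x, h, hfx⟩
      rw [ih (i0 + 1) hf si hex2]
      have hmax : (f :: t).foldl max hf = t.foldl max hf := by
        simp [max_eq_left hlt]
      rw [hmax]
      obtain ⟨x, hx, hfx⟩ := hex2
      have hxM : x ≤ t.foldl max hf := (PySem.List.le_foldl_max t hf).2 x hx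
      have hne : f ≠ t.foldl max hf := by omega
      rw [List.idxOf_cons_ne t hne]
      simp only [Prod.mk.injEq]
      exact ⟨trivial, by push_cast; ring⟩

theorem fs_idxOf?_of_mem (l : List Int) (v : Int) (h : v ∈ l) :
    List.idxOf? v l = some (List.idxOf v l) := by
  induction l with
  | nil => simp at h
  | cons a tl ih =>
    rw [List.idxOf?_cons, List.idxOf_cons]
    by_cases hav : a == v
    · simp [hav]
    · simp only [hav, cond_false, Bool.false_eq_true, if_false]
      have hv : v ∈ tl := by
        rcases List.mem_cons.mp h with h | h
        · exact absurd (beq_iff_eq.mpr h.symm) (by simpa using hav)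
        · exact h
      rw [ih hv]
      rfl

-- ===== VERDICT (by name: the statement is the Claim_ definition above) =====
theorem freq_sort_spec : Claim_equal_freq_sort := by
  intro k lst _dom hpre
  unfold Spec_freq_sort freq_sort freq_sort_alt
  have hs : List.Pairwise (· ≤ ·) (PySem.List.sorted lst (fun x => x)) :=
    PySem.List.sorted_pairwise lst (fun x => x)
  set s := PySem.List.sorted lst (fun x => x) with hsdef
  have hsne : s ≠ [] := fun h => hpre ((PySem.List.sorted_eq_nil_iff lst (fun x => x) false).mp h)
  have hn : 0 < s.length := List.length_pos_iff.mpr hsne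
  have hA := fs_A_freq s hs
  have hB := fs_loop_eq s hs 0 0 [] 0 0 (fun _ => Nat.zero_le _)
  have htf0 : fsTf s 0 = fsF s 0 :: fsTf s 1 := by
    unfold fsTf
    rw [show s.length - 0 = (s.length - 1) + 1 from by omega, List.range'_succ]
    rfl
  have hf0pos : 1 ≤ fsF s 0 := by
    unfold fsF
    have hmem : s.getD 0 0 ∈ s := by
      rw [List.getD_eq_getElem s 0 hn]
      exact List.getElem_mem _
    have hp : 0 < s.countP (fun v => decide (v ≤ s.getD 0 0 + 300)) :=
      List.countP_pos_iff.mpr ⟨_, hmem, by simp⟩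
    push_cast
    omega
  set M := (fsTf s 0).foldl max 0 with hM
  have hMB := fs_pfold_max (fsTf s 0) 0 0 0 ⟨fsF s 0, by rw [htf0]; simp, by omega⟩
  have hge : fsF s 0 ≤ M := (PySem.List.le_foldl_max (fsTf s 0) 0).2 _ (by rw [htf0]; simp)
  have hMmem : M ∈ fsTf s 0 := by
    rcases PySem.List.foldl_max_mem (fsTf s 0) 0 with h | h
    · omega
    · exact h
  have hmaxA : PySem.List.max? (fsTf s 0) (fun y => y) = some M := by
    rw [htf0, PySem.List.max?_id_cons]
    rw [hM, htf0]
    simp [max_eq_right (by omega : (0 : Int) ≤ fsF s 0)]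
  have hidx : PySem.List.index? (fsTf s 0) M = some (List.idxOf M (fsTf s 0)) := by
    rw [PySem.List.index?_eq_idxOf?]
    exact fs_idxOf?_of_mem _ _ hMmem
  simp only [hA, hB, hMB, List.nil_append, hmaxA, hidx, Option.getD_some]
  push_cast
  rw [← hM]
  simp
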